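-- pv_equiv track=rewrite | github.com/baris-kol/ProgramlamaLab | week1_Lesson1.py | my_frequency_with_list_of_tuples
-- ===== SOURCE A (Python) =====
-- def my_frequency_with_list_of_tuples(list1):
--     frequency_list = []
--     for i in range(len(list1)):
--         s=False
--         for j in range(len(frequency_list)):
--             if (list1[i]==frequency_list[j][0]):
--                 frequency_list[j][1]=frequency_list[j][1]+1
--                 s=True
--         if(s==False):
--             frequency_list.append([list1[i],1])
--     return frequency_list
-- ===== SOURCE B (Python) =====
-- def my_frequency_with_list_of_tuples(list1):
--     result = []
--     for i in range(len(list1)):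
--         x = list1[i]
--         if all(not (x == y) for y in list1[:i]):
--             result.append([x, 1 + sum(1 for y in list1[i + 1:] if x == y)])
--     return result
-- ===== Notes on version B (the rewrite author's own statement) =====
-- stated objective: alternative
-- what changed: Replaces A's incrementally mutated accumulator (each element scans and bumps the running frequency list) by a stateless per-index scheme: an element is emitted only at its first occurrence (prefix distinctness check) with its count computed directly as 1 plus a suffix scan.
import Mathlib
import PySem

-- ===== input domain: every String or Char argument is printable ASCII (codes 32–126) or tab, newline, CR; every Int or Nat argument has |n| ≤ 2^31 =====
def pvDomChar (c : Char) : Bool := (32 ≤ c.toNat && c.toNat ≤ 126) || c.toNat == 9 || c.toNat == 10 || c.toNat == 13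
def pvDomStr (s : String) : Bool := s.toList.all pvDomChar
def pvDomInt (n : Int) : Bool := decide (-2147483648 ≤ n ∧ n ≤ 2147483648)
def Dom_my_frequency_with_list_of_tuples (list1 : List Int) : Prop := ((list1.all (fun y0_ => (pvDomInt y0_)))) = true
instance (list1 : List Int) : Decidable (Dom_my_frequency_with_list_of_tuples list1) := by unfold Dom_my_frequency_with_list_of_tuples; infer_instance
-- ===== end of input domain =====

-- B replaces A's incrementally mutated frequency accumulator by a stateless per-index
-- scheme (first-occurrence prefix check + direct suffix count); objective: alternative.

-- ===== PORT A =====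
-- inner loop body: 'for j in range(len(frequency_list)): if list1[i]==frequency_list[j][0]: ...'
-- ported as a left fold that rebuilds frequency_list with the in-place updates applied;
-- e.getD 0 0 / e.getD 1 0 port e[0] / e[1] (exact: every entry is a 2-element list [x,c]).
def pvStepA (list1 : List Int) (frequency_list : List (List Int)) (i : Nat) : List (List Int) :=
  let st := frequency_list.foldl
    (fun (st : List (List Int) × Bool) e =>
      if list1.getD i 0 = e.getD 0 0 then (st.1 ++ [[e.getD 0 0, e.getD 1 0 + 1]], true)
      else (st.1 ++ [e], st.2)) ([], false)
  if st.2 = false then st.1 ++ [[list1.getD i 0, 1]] else st.1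

-- list1.getD i 0 ports list1[i] (exact: i ∈ range(len(list1)))
def my_frequency_with_list_of_tuples (list1 : List Int) : List (List Int) :=
  (List.range list1.length).foldl (pvStepA list1) []

-- ===== PORT B =====
-- 'if all(not (x == y) for y in list1[:i]): result.append([x, 1 + sum(1 for y in list1[i+1:] if x == y)])'
def pvStepB (list1 : List Int) (result : List (List Int)) (i : Nat) : List (List Int) :=
  let x := list1.getD i 0
  if (list1.take i).all (fun y => !(x == y)) then
    result ++ [[x, 1 + ((list1.drop (i+1)).countP (fun y => x == y) : Int)]]
  else result

def my_frequency_with_list_of_tuples_alt (list1 : List Int) : List (List Int) :=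
  (List.range list1.length).foldl (pvStepB list1) []

-- ===== PRECONDITION & SPEC =====
def Spec_my_frequency_with_list_of_tuples (list1 : List Int) (out : List (List Int)) : Prop := out = my_frequency_with_list_of_tuples_alt list1
instance (list1 : List Int) (out : List (List Int)) : Decidable (Spec_my_frequency_with_list_of_tuples list1 out) := by unfold Spec_my_frequency_with_list_of_tuples; infer_instance

-- ===== CLAIM (what is proved, stated in full; the proofs are below) =====
def Claim_equal_my_frequency_with_list_of_tuples : Prop := ∀ (list1 : List Int), Dom_my_frequency_with_list_of_tuples list1 → Spec_my_frequency_with_list_of_tuples list1 (my_frequency_with_list_of_tuples list1)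

-- ===== LEMMAS AND PROOFS =====

-- distinct elements of l in first-occurrence order
def pvReps : List Int → List Int
  | [] => []
  | x :: xs => x :: (pvReps xs).filter (fun y => y != x)

lemma mem_pvReps (y : Int) : ∀ l : List Int, y ∈ pvReps l ↔ y ∈ l := by
  intro l
  induction l with
  | nil => simp [pvReps]
  | cons a xs ih =>
    by_cases h : y = a
    · simp [pvReps, h]
    · simp [pvReps, List.mem_filter, h, ih]

lemma pvReps_snoc (l : List Int) (x : Int) :
    pvReps (l ++ [x]) = if x ∈ l then pvReps l else pvReps l ++ [x] := by
  induction l with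
  | nil => simp [pvReps]
  | cons a xs ih =>
    by_cases hxa : x = a
    · subst hxa
      by_cases hx : x ∈ xs <;>
        simp [pvReps, ih, hx, List.filter_append]
    · by_cases hx : x ∈ xs <;>
        simp [pvReps, ih, hx, hxa, List.filter_append]

-- the common closed form both ports reach
def pvSpecFn (l : List Int) : List (List Int) :=
  (pvReps l).map (fun y => ([y, (l.count y : Int)] : List Int))

lemma take_succ_getD (l : List Int) (n : Nat) (h : n < l.length) :
    l.take (n+1) = l.take n ++ [l.getD n 0] := by
  rw [List.take_add_one]
  simp [List.getD, List.getElem?_eq_getElem h]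

lemma drop_cons_getD (l : List Int) (n : Nat) (h : n < l.length) :
    l.drop n = l.getD n 0 :: l.drop (n+1) := by
  rw [List.drop_eq_getElem_cons h]
  simp [List.getD, List.getElem?_eq_getElem h]

-- effect of A's inner loop on a well-shaped frequency list
lemma innerA_spec (x : Int) (ys : List Int) (g : Int → Int) :
    ∀ (acc : List (List Int)) (s : Bool),
    (ys.map (fun y => ([y, g y] : List Int))).foldl
      (fun (st : List (List Int) × Bool) e =>
        if x = e.getD 0 0 then (st.1 ++ [[e.getD 0 0, e.getD 1 0 + 1]], true)
        else (st.1 ++ [e], st.2)) (acc, s)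
    = (acc ++ ys.map (fun y => if x = y then ([y, g y + 1] : List Int) else [y, g y]),
       s || ys.any (fun y => x == y)) := by
  induction ys with
  | nil => simp
  | cons a t ih =>
    intro acc s
    simp only [List.map_cons, List.foldl_cons]
    have e0 : ([a, g a] : List Int).getD 0 0 = a := rfl
    have e1 : ([a, g a] : List Int).getD 1 0 = g a := rfl
    rw [e0, e1]
    by_cases h : x = a
    · rw [if_pos h, ih]
      simp [h]
    · rw [if_neg h, ih]
      have hb : (x == a) = false := by simp [h]
      simp [h, hb]

lemma pvStepA_spec (l : List Int) (i : Nat) (ys : List Int) (g : Int → Int) :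
    pvStepA l (ys.map fun y => ([y, g y] : List Int)) i
    = if l.getD i 0 ∈ ys
      then ys.map (fun y => if l.getD i 0 = y then ([y, g y + 1] : List Int) else [y, g y])
      else ys.map (fun y => ([y, g y] : List Int)) ++ [[l.getD i 0, 1]] := by
  simp only [pvStepA, innerA_spec, List.nil_append, Bool.false_or]
  set x := l.getD i 0 with hxdef
  by_cases hm : x ∈ ys
  · have hany : (ys.any fun y => l.getD i 0 == y) = true := by
      simp only [List.any_eq_true, beq_iff_eq]
      exact ⟨_, hm, rfl⟩
    rw [hany, if_neg (by simp), if_pos hm]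
  · have hany : (ys.any fun y => l.getD i 0 == y) = false := by
      simp only [List.any_eq_false, beq_iff_eq]
      intro y hy he
      exact hm (by rw [hxdef, he]; exact hy)
    rw [hany, if_pos rfl, if_neg hm]
    congr 1
    apply List.map_congr_left
    intro y hy
    have hne : ¬ x = y := fun he => hm (by rw [he]; exact hy)
    simp [hne]

lemma A_partial (l : List Int) : ∀ n, n ≤ l.length →
    (List.range n).foldl (pvStepA l) []
      = (pvReps (l.take n)).map (fun y => ([y, ((l.take n).count y : Int)] : List Int)) := by
  intro n
  induction n with
  | zero => simp [pvReps]
  | succ n ih =>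
    intro hn
    have hlt : n < l.length := hn
    rw [List.range_succ, List.foldl_append, ih (le_of_lt hlt), List.foldl_cons, List.foldl_nil,
        pvStepA_spec l n (pvReps (l.take n)) (fun y => ((l.take n).count y : Int)),
        take_succ_getD l n hlt, pvReps_snoc]
    set x := l.getD n 0 with hxdef
    by_cases hmem : x ∈ l.take n
    · rw [if_pos ((mem_pvReps _ _).2 hmem), if_pos hmem]
      apply List.map_congr_left
      intro y hy
      by_cases hxy : x = y
      · rw [if_pos hxy]
        have hc : (l.take n ++ [x]).count y = (l.take n).count y + 1 := by
          subst hxy; simp [List.count_append]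
        rw [hc]
        simp
      · rw [if_neg hxy]
        have hyx : y ≠ x := fun he => hxy he.symm
        simp [List.count_append, List.count_nil, hxy]
    · rw [if_neg (fun h => hmem ((mem_pvReps _ _).1 h)), if_neg hmem, List.map_append]
      congr 1
      · apply List.map_congr_left
        intro y hy
        have hyx : y ≠ x := fun he => hmem (he ▸ (mem_pvReps y _).1 hy)
        have hxy : ¬ x = y := fun he => hyx he.symm
        simp [List.count_append, List.count_nil, hxy]
      · have h0 : (l.take n).count x = 0 := List.count_eq_zero_of_not_mem hmem
        simp [List.count_append, List.count_cons, List.count_nil, h0]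

lemma all_take_iff (l : List Int) (n : Nat) (x : Int) :
    ((l.take n).all (fun y => !(x == y)) = true) ↔ x ∉ l.take n := by
  simp only [List.all_eq_true, Bool.not_eq_eq_eq_not, Bool.not_true, beq_eq_false_iff_ne]
  constructor
  · intro h hx; exact (h x hx) rfl
  · intro h y hy he; exact h (he ▸ hy)

lemma countP_eq_count (x : Int) (l : List Int) :
    l.countP (fun y => x == y) = l.count x := by
  unfold List.count
  apply List.countP_congr
  intro y _
  by_cases h : x = y
  · subst h; rfl
  · have h' : ¬ y = x := fun he => h he.symm
    simp [h, h']

lemma B_partial (l : List Int) : ∀ n, n ≤ l.length →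
    (List.range n).foldl (pvStepB l) []
      = (pvReps (l.take n)).map (fun y => ([y, (l.count y : Int)] : List Int)) := by
  intro n
  induction n with
  | zero => intro _; rfl
  | succ n ih =>
    intro hn
    have hlt : n < l.length := hn
    rw [List.range_succ, List.foldl_append, ih (le_of_lt hlt), List.foldl_cons, List.foldl_nil,
        take_succ_getD l n hlt, pvReps_snoc]
    simp only [pvStepB]
    set x := l.getD n 0 with hxdef
    by_cases hmem : x ∈ l.take n
    · rw [if_neg (fun hc => (all_take_iff l n _).1 hc hmem), if_pos hmem]
    · rw [if_pos ((all_take_iff l n _).2 hmem), if_neg hmem, List.map_append]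
      congr 1
      have hc : (l.count x : Int)
          = 1 + ((l.drop (n+1)).countP (fun y => x == y) : Int) := by
        rw [countP_eq_count]
        have hsplit : l.count x
            = (l.take n).count x + (l.drop n).count x := by
          conv_lhs => rw [← List.take_append_drop n l]
          rw [List.count_append]
        have h0 : (l.take n).count x = 0 := List.count_eq_zero_of_not_mem hmem
        have hd : (l.drop n).count x = 1 + (l.drop (n+1)).count x := by
          rw [drop_cons_getD l n hlt, ← hxdef]
          simp
          omega
        rw [hsplit, h0, hd]
        push_cast
        ring
      simp only [List.map_cons, List.map_nil]
      rw [hc]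

lemma A_eq_spec (l : List Int) : my_frequency_with_list_of_tuples l = pvSpecFn l := by
  unfold my_frequency_with_list_of_tuples pvSpecFn
  rw [A_partial l l.length le_rfl, List.take_length]

lemma B_eq_spec (l : List Int) : my_frequency_with_list_of_tuples_alt l = pvSpecFn l := by
  unfold my_frequency_with_list_of_tuples_alt pvSpecFn
  rw [B_partial l l.length le_rfl, List.take_length]

-- ===== VERDICT (by name: the statement is the Claim_ definition above) =====
theorem my_frequency_with_list_of_tuples_spec : Claim_equal_my_frequency_with_list_of_tuples := by
  intro l _
  unfold Spec_my_frequency_with_list_of_tuples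
  rw [A_eq_spec, B_eq_spec]
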